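-- pv_equiv track=rewrite | github.com/jholog/challenges-py | programmers/pccp/employeetraining.py | solution
-- ===== SOURCE A (Python) =====
-- import heapq
--
-- def solution(ability, number):
--     h = []
--     for a in ability:
--         heapq.heappush(h, a)
--
--     for _ in range(number):
--         x = heapq.heappop(h)
--         y = heapq.heappop(h)
--         heapq.heappush(h, x + y)
--         heapq.heappush(h, x + y)
--
--     return sum(list(h))
-- ===== SOURCE B (Python) =====
-- def _extract_min(h):
--     m = h[0]
--     mi = 0
--     for i in range(1, len(h)):
--         if h[i] < m:
--             m = h[i]
--             mi = i
--     return h.pop(mi)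
--
--
-- def solution(ability, number):
--     h = list(ability)
--     for _ in range(number):
--         x = _extract_min(h)
--         y = _extract_min(h)
--         h.append(x + y)
--         h.append(x + y)
--     return sum(h)
-- ===== Notes on version B (the rewrite author's own statement) =====
-- stated objective: alternative
-- what changed: Replaces heapq's binary heap (heappush/heappop with sift operations) by a plain list with a manual linear-scan extract-min and two appends per round.
import Mathlib
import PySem

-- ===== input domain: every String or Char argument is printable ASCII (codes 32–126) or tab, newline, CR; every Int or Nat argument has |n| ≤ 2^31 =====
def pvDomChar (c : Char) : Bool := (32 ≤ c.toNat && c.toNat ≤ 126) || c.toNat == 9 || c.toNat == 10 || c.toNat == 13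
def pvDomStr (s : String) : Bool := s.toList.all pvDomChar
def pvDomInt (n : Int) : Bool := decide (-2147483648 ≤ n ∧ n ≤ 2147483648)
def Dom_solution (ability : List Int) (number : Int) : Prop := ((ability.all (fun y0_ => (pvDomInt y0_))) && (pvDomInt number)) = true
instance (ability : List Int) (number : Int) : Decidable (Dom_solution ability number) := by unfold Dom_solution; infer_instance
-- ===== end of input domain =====

-- B replaces A's binary heap (heapq) by a plain list with a linear-scan extract-min; same
-- multiset evolution, so the same returned sum. Objective: alternative decomposition, not speed.

-- ===== PORT A =====
-- heapq._siftdown(heap, startpos, pos): newitem = heap[pos] is passed explicitly; the loop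
-- moves parents down along the ancestor chain and finally writes newitem (exact transliteration;
-- the stale cell at the current hole is never read before being overwritten).
def pvSiftdownGo (startpos : Nat) (newitem : Int) (heap : List Int) (pos : Nat) : List Int :=
  if _h : startpos < pos then
    let parentpos := (pos - 1) / 2
    let parent := heap.getD parentpos 0
    if newitem < parent then
      pvSiftdownGo startpos newitem (heap.set pos parent) parentpos
    else heap.set pos newitem
  else heap.set pos newitem
termination_by pos
decreasing_by omega

-- heapq.heappush
def pvHeappush (heap : List Int) (item : Int) : List Int :=
  pvSiftdownGo 0 item (heap ++ [item]) heap.length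

-- heapq._siftup(heap, pos) with startpos = 0: walk down to a leaf copying the smaller child up,
-- then heapq does heap[pos] = newitem and _siftdown(heap, 0, pos); pvSiftdownGo performs that
-- final write itself, so we call it directly (the hole cell is never read before that write).
def pvSiftupGo (newitem : Int) (heap : List Int) (pos : Nat) : List Int :=
  if _h : 2 * pos + 1 < heap.length then
    let childpos := if 2 * pos + 2 < heap.length ∧ ¬ (heap.getD (2 * pos + 1) 0 < heap.getD (2 * pos + 2) 0)
                    then 2 * pos + 2 else 2 * pos + 1
    pvSiftupGo newitem (heap.set pos (heap.getD childpos 0)) childpos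
  else pvSiftdownGo 0 newitem heap pos
termination_by heap.length - pos
decreasing_by simp only [List.length_set]; split <;> omega

-- heapq.heappop; none = IndexError on the empty heap
def pvHeappop (heap : List Int) : Option (Int × List Int) :=
  match heap.getLast? with
  | none => none
  | some lastelt =>
    let rest := heap.dropLast
    if rest.isEmpty then some (lastelt, rest)
    else some (rest.getD 0 0, pvSiftupGo lastelt (rest.set 0 lastelt) 0)

-- one iteration of A's for-loop; none = IndexError from a heappop
def pvStepA (h : List Int) : Option (List Int) :=
  match pvHeappop h with
  | none => none
  | some (x, h1) =>
    match pvHeappop h1 with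
    | none => none
    | some (y, h2) => some (pvHeappush (pvHeappush h2 (x + y)) (x + y))

def pvLoopA : Nat → Option (List Int) → Option (List Int)
  | 0, s => s
  | n + 1, s => pvLoopA n (match s with | none => none | some h => pvStepA h)

def solution (ability : List Int) (number : Int) : Int :=
  let h := ability.foldl (fun acc a => pvHeappush acc a) []
  match pvLoopA number.toNat (some h) with
  | some hh => hh.sum
  | none => 0

-- ===== PORT B =====
-- _extract_min's scan loop: m/mi hold the current minimum and its index, i the loop index
def pvScanMin (h : List Int) (m : Int) (mi : Nat) (i : Nat) : Int × Nat :=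
  if _h : i < h.length then
    if h.getD i 0 < m then pvScanMin h (h.getD i 0) i (i + 1)
    else pvScanMin h m mi (i + 1)
  else (m, mi)
termination_by h.length - i
decreasing_by all_goals omega

-- _extract_min; none = IndexError of h[0] on the empty list
def pvExtractMin (l : List Int) : Option (Int × List Int) :=
  match l with
  | [] => none
  | a :: _ =>
    let p := pvScanMin l a 0 1
    some (p.1, l.eraseIdx p.2)

def pvStepB (l : List Int) : Option (List Int) :=
  match pvExtractMin l with
  | none => none
  | some (x, l1) =>
    match pvExtractMin l1 with
    | none => none
    | some (y, l2) => some ((l2 ++ [x + y]) ++ [x + y])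

def pvLoopB : Nat → Option (List Int) → Option (List Int)
  | 0, s => s
  | n + 1, s => pvLoopB n (match s with | none => none | some l => pvStepB l)

def solution_alt (ability : List Int) (number : Int) : Int :=
  match pvLoopB number.toNat (some ability) with
  | some l => l.sum
  | none => 0

-- ===== PRECONDITION & SPEC =====
-- Pre_ excludes exactly the inputs where A raises IndexError: a positive number of merge
-- rounds with fewer than two initial abilities (each round pops twice from a heap whose size
-- never drops below its initial size).
def Pre_solution (ability : List Int) (number : Int) : Prop := 0 < number → 2 ≤ ability.length
instance (ability : List Int) (number : Int) : Decidable (Pre_solution ability number) := by unfold Pre_solution; infer_instance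

def pvWitness_solution : List Int × Int := ([4, 1, 3, 2], 2)

def Spec_solution (ability : List Int) (number : Int) (out : Int) : Prop := out = solution_alt ability number
instance (ability : List Int) (number : Int) (out : Int) : Decidable (Spec_solution ability number out) := by unfold Spec_solution; infer_instance

-- ===== CLAIM (what is proved, stated in full; the proofs are below) =====
def Claim_equal_solution : Prop := ∀ (ability : List Int) (number : Int), Dom_solution ability number → Pre_solution ability number → Spec_solution ability number (solution ability number)

-- ===== LEMMAS AND PROOFS =====

-- array-encoded binary-heap property: every non-root cell dominates its parent
def PvIsHeap (h : List Int) : Prop :=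
  ∀ j, 0 < j → j < h.length → h.getD ((j - 1) / 2) 0 ≤ h.getD j 0

-- heap property away from a hole at p (the pairs whose child is the hole are exempt)
def PvAlmost (h : List Int) (p : Nat) : Prop :=
  ∀ j, 0 < j → j < h.length → j ≠ p → h.getD ((j - 1) / 2) 0 ≤ h.getD j 0

-- children of the hole are ≥ newitem and ≥ the hole's parent
def PvChildDom (h : List Int) (p : Nat) (v : Int) : Prop :=
  ∀ j, 0 < j → j < h.length → (j - 1) / 2 = p →
    v ≤ h.getD j 0 ∧ (0 < p → h.getD ((p - 1) / 2) 0 ≤ h.getD j 0)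

-- heap property except on pairs touching the hole p (as parent or child)
def PvHole (h : List Int) (p : Nat) : Prop :=
  ∀ j, 0 < j → j < h.length → j ≠ p → (j - 1) / 2 ≠ p → h.getD ((j - 1) / 2) 0 ≤ h.getD j 0

-- children of the hole dominate the hole's parent
def PvGrand (h : List Int) (p : Nat) : Prop :=
  0 < p → ∀ j, 0 < j → j < h.length → (j - 1) / 2 = p → h.getD ((p - 1) / 2) 0 ≤ h.getD j 0

theorem pv_getD_set_self {h : List Int} {i : Nat} (hi : i < h.length) (v : Int) :
    (h.set i v).getD i 0 = v := by
  rw [List.getD_eq_getElem _ _ (by simpa using hi)]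
  simp

theorem pv_getD_set_ne {h : List Int} {i j : Nat} (hij : i ≠ j) (v : Int) :
    (h.set i v).getD j 0 = h.getD j 0 := by
  simp [List.getD_eq_getElem?_getD, hij]

theorem pv_count_set {h : List Int} {i : Nat} (hi : i < h.length) (v b : Int) :
    List.count b (h.set i v) + (if h.getD i 0 = b then 1 else 0)
      = List.count b h + (if v = b then 1 else 0) := by
  have hmem : h.getD i 0 ∈ h := by
    rw [List.getD_eq_getElem _ _ hi]; exact List.getElem_mem hi
  have hc : 1 ≤ List.count (h.getD i 0) h := List.one_le_count_iff.mpr hmem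
  have := List.count_set (a := v) (b := b) (l := h) (i := i) hi
  rw [List.getD_eq_getElem _ _ hi] at *
  by_cases h1 : h[i] = b <;> by_cases h2 : v = b <;>
    simp_all

theorem pv_perm_set_set {h : List Int} {i j : Nat} (hij : i ≠ j)
    (hi : i < h.length) (hj : j < h.length) (x : Int) :
    ((h.set i (h.getD j 0)).set j x).Perm (h.set i x) := by
  rw [List.perm_iff_count]; intro b
  have e1 := pv_count_set (h := h.set i (h.getD j 0)) (i := j)
      (by simpa using hj) x b
  rw [pv_getD_set_ne hij] at e1
  have e2 := pv_count_set (h := h) (i := i) hi (h.getD j 0) b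
  have e3 := pv_count_set (h := h) (i := i) hi x b
  omega

theorem pv_perm_head_set {h : List Int} (h0 : 0 < h.length) (x : Int) :
    ((h.getD 0 0) :: h.set 0 x).Perm (x :: h) := by
  rw [List.perm_iff_count]; intro b
  have e1 := pv_count_set (h := h) (i := 0) h0 x b
  simp only [List.count_cons]
  by_cases hb : h.getD 0 0 = b <;> by_cases hx : x = b <;> simp_all

theorem pv_set_same {h : List Int} {i : Nat} (hi : i < h.length) {v : Int}
    (hv : h.getD i 0 = v) : h.set i v = h := by
  rw [List.getD_eq_getElem _ _ hi] at hv
  rw [← hv]; exact List.set_getElem_self hi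

theorem pv_root_le {h : List Int} (hh : PvIsHeap h) :
    ∀ j, j < h.length → h.getD 0 0 ≤ h.getD j 0 := by
  intro j
  induction j using Nat.strong_induction_on with
  | _ j ih =>
    intro hj
    rcases Nat.eq_zero_or_pos j with h0 | h0
    · subst h0; exact le_refl _
    · exact le_trans (ih ((j - 1) / 2) (by omega) (by omega)) (hh j h0 hj)

theorem pv_siftdownGo_spec (newitem : Int) :
    ∀ pos heap, pos < heap.length → PvAlmost heap pos → PvChildDom heap pos newitem →
    PvIsHeap (pvSiftdownGo 0 newitem heap pos) ∧
      (pvSiftdownGo 0 newitem heap pos).Perm (heap.set pos newitem) := by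
  intro pos
  induction pos using Nat.strong_induction_on with
  | _ pos ih =>
    intro heap hlen halm hcd
    rw [pvSiftdownGo]
    by_cases hp : 0 < pos
    · simp only [hp, dif_pos]
      set pp := (pos - 1) / 2 with hpp
      have hpplt : pp < pos := by omega
      have hppne : pos ≠ pp := by omega
      by_cases hlt : newitem < heap.getD pp 0
      · simp only [hlt, if_pos]
        have hpplen : pp < (heap.set pos (heap.getD pp 0)).length := by
          simp [List.length_set]; omega
        have halm' : PvAlmost (heap.set pos (heap.getD pp 0)) pp := by
          intro j hj0 hjlen hjne
          simp only [List.length_set] at hjlen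
          by_cases hjp : j = pos
          · subst hjp
            rw [pv_getD_set_ne (by omega), pv_getD_set_self hlen]
          · rw [pv_getD_set_ne (Ne.symm hjp)]
            by_cases hparj : (j - 1) / 2 = pos
            · rw [hparj, pv_getD_set_self hlen]
              exact (hcd j hj0 hjlen (by omega)).2 hp
            · rw [pv_getD_set_ne (by omega)]
              exact halm j hj0 hjlen hjp
        have hcd' : PvChildDom (heap.set pos (heap.getD pp 0)) pp newitem := by
          intro j hj0 hjlen hparj
          simp only [List.length_set] at hjlen
          have hppar : pp ≠ pos := by omega
          constructor
          · by_cases hjp : j = pos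
            · subst hjp; rw [pv_getD_set_self hlen]; exact le_of_lt hlt
            · rw [pv_getD_set_ne (Ne.symm hjp)]
              exact le_trans (le_of_lt hlt) (by
                have := halm j hj0 hjlen hjp
                rwa [hparj] at this)
          · intro hpp0
            rw [pv_getD_set_ne (show pos ≠ (pp - 1) / 2 by omega)]
            have h1 : heap.getD ((pp - 1) / 2) 0 ≤ heap.getD pp 0 :=
              halm pp hpp0 (by omega) (by omega)
            by_cases hjp : j = pos
            · subst hjp; rw [pv_getD_set_self hlen]; exact h1
            · rw [pv_getD_set_ne (Ne.symm hjp)]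
              exact le_trans h1 (by
                have := halm j hj0 hjlen hjp
                rwa [hparj] at this)
        obtain ⟨hih1, hih2⟩ := ih pp hpplt (heap.set pos (heap.getD pp 0))
          hpplen halm' hcd'
        refine ⟨hih1, hih2.trans ?_⟩
        exact pv_perm_set_set hppne hlen (by omega) newitem
      · simp only [if_neg hlt]
        refine ⟨?_, List.Perm.refl _⟩
        intro j hj0 hjlen
        simp only [List.length_set] at hjlen
        by_cases hjp : j = pos
        · subst hjp
          rw [pv_getD_set_ne (by omega), pv_getD_set_self hlen, ← hpp]
          omega
        · rw [pv_getD_set_ne (Ne.symm hjp)]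
          by_cases hparj : (j - 1) / 2 = pos
          · rw [hparj, pv_getD_set_self hlen]
            exact (hcd j hj0 hjlen hparj).1
          · rw [pv_getD_set_ne (by omega)]
            exact halm j hj0 hjlen hjp
    · simp only [dif_neg hp]
      have hp0 : pos = 0 := by omega
      subst hp0
      refine ⟨?_, List.Perm.refl _⟩
      intro j hj0 hjlen
      simp only [List.length_set] at hjlen
      rw [pv_getD_set_ne (show (0:ℕ) ≠ j by omega)]
      by_cases hparj : (j - 1) / 2 = 0
      · rw [hparj, pv_getD_set_self hlen]
        exact (hcd j hj0 hjlen hparj).1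
      · rw [pv_getD_set_ne (show (0:ℕ) ≠ (j - 1) / 2 by omega)]
        exact halm j hj0 hjlen (by omega)

theorem pv_siftupGo_spec (newitem : Int) :
    ∀ n heap pos, heap.length ≤ pos + n → pos < heap.length → PvHole heap pos → PvGrand heap pos →
    PvIsHeap (pvSiftupGo newitem heap pos) ∧
      (pvSiftupGo newitem heap pos).Perm (heap.set pos newitem) := by
  intro n
  induction n with
  | zero => intro heap pos hb hlen _ _; omega
  | succ n ih =>
    intro heap pos hb hlen hhole hgrand
    rw [pvSiftupGo]
    by_cases hc : 2 * pos + 1 < heap.length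
    · simp only [dif_pos hc]
      set cpos := if 2 * pos + 2 < heap.length ∧ ¬ (heap.getD (2 * pos + 1) 0 < heap.getD (2 * pos + 2) 0)
                  then 2 * pos + 2 else 2 * pos + 1 with hcpos
      have hcases : cpos = 2 * pos + 1 ∨ cpos = 2 * pos + 2 := by
        rw [hcpos]; split_ifs <;> simp
      have hcrange : pos < cpos ∧ cpos < heap.length := by
        rw [hcpos]; split_ifs with h <;> omega
      have hcpar : (cpos - 1) / 2 = pos := by omega
      have hcmin : ∀ s, 0 < s → s < heap.length → (s - 1) / 2 = pos →
          heap.getD cpos 0 ≤ heap.getD s 0 := by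
        intro s hs0 hslen hspar
        have hs : s = 2 * pos + 1 ∨ s = 2 * pos + 2 := by omega
        rw [hcpos]; split_ifs with hcond
        · rcases hs with h | h <;> subst h
          · exact not_lt.mp hcond.2
          · exact le_refl _
        · rcases hs with h | h <;> subst h
          · exact le_refl _
          · push Not at hcond
            exact le_of_lt (hcond (by omega))
      have hole' : PvHole (heap.set pos (heap.getD cpos 0)) cpos := by
        intro j hj0 hjlen hjne hjpar
        simp only [List.length_set] at hjlen
        by_cases hjp : j = pos
        · subst hjp
          rw [pv_getD_set_ne (show j ≠ (j - 1) / 2 by omega), pv_getD_set_self hlen]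
          exact hgrand hj0 cpos (by omega) hcrange.2 hcpar
        · by_cases hjpar2 : (j - 1) / 2 = pos
          · rw [hjpar2, pv_getD_set_self hlen, pv_getD_set_ne (Ne.symm hjp)]
            exact hcmin j hj0 hjlen hjpar2
          · rw [pv_getD_set_ne (show pos ≠ (j - 1) / 2 by omega),
                pv_getD_set_ne (Ne.symm hjp)]
            exact hhole j hj0 hjlen hjp hjpar2
      have grand' : PvGrand (heap.set pos (heap.getD cpos 0)) cpos := by
        intro _ j hj0 hjlen hjpar
        simp only [List.length_set] at hjlen
        have hjne : j ≠ pos := by omega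
        rw [hcpar, pv_getD_set_self hlen, pv_getD_set_ne (Ne.symm hjne)]
        have := hhole j hj0 hjlen hjne (by omega)
        rwa [hjpar] at this
      obtain ⟨r1, r2⟩ := ih (heap.set pos (heap.getD cpos 0)) cpos
        (by simp only [List.length_set]; omega)
        (by simp only [List.length_set]; omega) hole' grand'
      refine ⟨r1, r2.trans ?_⟩
      exact pv_perm_set_set (show pos ≠ cpos by omega) hlen hcrange.2 newitem
    · simp only [dif_neg hc]
      apply pv_siftdownGo_spec newitem pos heap hlen
      · intro j hj0 hjlen hjne
        exact hhole j hj0 hjlen hjne (by omega)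
      · intro j hj0 hjlen hjpar
        exact absurd hjlen (by omega)

theorem pv_heappush_spec {h : List Int} (hh : PvIsHeap h) (a : Int) :
    PvIsHeap (pvHeappush h a) ∧ (pvHeappush h a).Perm (a :: h) := by
  unfold pvHeappush
  obtain ⟨r1, r2⟩ := pv_siftdownGo_spec a h.length (h ++ [a])
    (by simp) (by
      intro j hj0 hjlen hjne
      simp only [List.length_append, List.length_cons, List.length_nil] at hjlen
      rw [List.getD_append _ _ _ _ (by omega), List.getD_append _ _ _ _ (by omega)]
      exact hh j hj0 (by omega)) (by
      intro j hj0 hjlen hjpar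
      simp only [List.length_append, List.length_cons, List.length_nil] at hjlen
      omega)
  refine ⟨r1, r2.trans ?_⟩
  rw [pv_set_same (by simp) (by simp [List.getD_eq_getElem?_getD])]
  exact List.perm_append_singleton a h

theorem pv_getD_dropLast {h : List Int} {j : Nat} (hj : j < h.length - 1) :
    h.dropLast.getD j 0 = h.getD j 0 := by
  rw [List.getD_eq_getElem _ _ (by simp [List.length_dropLast]; omega),
      List.getD_eq_getElem _ _ (by omega), List.getElem_dropLast]

theorem pv_heappop_spec {h : List Int} (hh : PvIsHeap h) (hne : h ≠ []) :
    ∃ x h', pvHeappop h = some (x, h') ∧ PvIsHeap h' ∧ x ∈ h ∧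
      (∀ z ∈ h, x ≤ z) ∧ (x :: h').Perm h := by
  unfold pvHeappop
  rw [List.getLast?_eq_some_getLast hne]
  by_cases h1 : h.length = 1
  · obtain ⟨a, rfl⟩ : ∃ a, h = [a] := by
      cases h with
      | nil => exact absurd rfl hne
      | cons x t =>
        cases t with
        | nil => exact ⟨x, rfl⟩
        | cons b u => simp at h1
    refine ⟨a, [], rfl, ?_, by simp, ?_, by simp⟩
    · intro j hj0 hjlen; simp at hjlen
    · intro z hz; simp at hz; omega
  · have hlen2 : 2 ≤ h.length := by
      cases h with
      | nil => exact absurd rfl hne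
      | cons a t => cases t with
        | nil => simp at h1
        | cons b u => simp only [List.length_cons]; omega
    have hrestne : h.dropLast ≠ [] := by
      have : h.dropLast.length = h.length - 1 := List.length_dropLast
      intro hcon; rw [hcon] at this; simp at this; omega
    simp only [List.isEmpty_iff, if_neg hrestne]
    set lastelt := h.getLast hne with hlast
    set rest := h.dropLast with hrest
    have hrlen : rest.length = h.length - 1 := List.length_dropLast
    obtain ⟨r1, r2⟩ := pv_siftupGo_spec lastelt (rest.set 0 lastelt).length
      (rest.set 0 lastelt) 0 (by omega) (by simp [List.length_set]; omega)
      (by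
        intro j hj0 hjlen hjne hjpar
        simp only [List.length_set] at hjlen
        rw [pv_getD_set_ne (show (0:ℕ) ≠ j by omega),
            pv_getD_set_ne (show (0:ℕ) ≠ (j - 1) / 2 by omega),
            pv_getD_dropLast (by omega), pv_getD_dropLast (by omega)]
        exact hh j hj0 (by omega))
      (by intro hcon; omega)
    rw [List.set_set] at r2
    refine ⟨rest.getD 0 0, _, rfl, r1, ?_, ?_, ?_⟩
    · rw [pv_getD_dropLast (by omega), List.getD_eq_getElem _ _ (by omega)]
      exact List.getElem_mem _
    · intro z hz
      rw [pv_getD_dropLast (by omega)]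
      obtain ⟨j, hjlen, rfl⟩ := List.mem_iff_getElem.mp hz
      rw [← List.getD_eq_getElem h 0 hjlen]
      exact pv_root_le hh j hjlen
    · refine ((r2.cons _).trans ?_)
      have hstep : ((rest.getD 0 0) :: rest.set 0 lastelt).Perm (lastelt :: rest) :=
        pv_perm_head_set (by omega) lastelt
      refine hstep.trans ?_
      refine ((List.perm_append_singleton lastelt rest).symm.trans ?_)
      rw [hrest, hlast, List.dropLast_append_getLast hne]

theorem pv_scanMin_spec' {h : List Int} :
    ∀ n i m mi, h.length ≤ i + n → mi < h.length → h.getD mi 0 = m →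
    (∀ j, j < i → j < h.length → m ≤ h.getD j 0) →
    (pvScanMin h m mi i).2 < h.length ∧
      h.getD (pvScanMin h m mi i).2 0 = (pvScanMin h m mi i).1 ∧
      ∀ j, j < h.length → (pvScanMin h m mi i).1 ≤ h.getD j 0 := by
  intro n
  induction n with
  | zero =>
    intro i m mi hb hmi hm hprev
    rw [pvScanMin]
    simp only [dif_neg (show ¬ i < h.length by omega)]
    exact ⟨hmi, hm, fun j hj => hprev j (by omega) hj⟩
  | succ n ih =>
    intro i m mi hb hmi hm hprev
    rw [pvScanMin]
    by_cases hi : i < h.length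
    · simp only [dif_pos hi]
      by_cases hlt : h.getD i 0 < m
      · simp only [if_pos hlt]
        refine ih (i + 1) (h.getD i 0) i (by omega) hi rfl ?_
        intro j hj hjl
        rcases Nat.lt_succ_iff_lt_or_eq.mp hj with h' | h'
        · exact le_trans (le_of_lt hlt) (hprev j h' hjl)
        · subst h'; exact le_refl _
      · simp only [if_neg hlt]
        refine ih (i + 1) m mi (by omega) hmi hm ?_
        intro j hj hjl
        rcases Nat.lt_succ_iff_lt_or_eq.mp hj with h' | h'
        · exact hprev j h' hjl
        · subst h'; exact not_lt.mp hlt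
    · simp only [dif_neg hi]
      exact ⟨hmi, hm, fun j hj => hprev j (by omega) hj⟩

theorem pv_extractMin_spec {l : List Int} (hne : l ≠ []) :
    ∃ x l', pvExtractMin l = some (x, l') ∧ x ∈ l ∧
      (∀ z ∈ l, x ≤ z) ∧ (x :: l').Perm l := by
  cases l with
  | nil => exact absurd rfl hne
  | cons a t =>
    obtain ⟨hmi, hm, hmin⟩ := pv_scanMin_spec' (h := a :: t) (a :: t).length 1 a 0
      (by omega) (by simp) rfl (by intro j hj hjl; interval_cases j; exact le_refl _)
    refine ⟨(pvScanMin (a :: t) a 0 1).1, (a :: t).eraseIdx (pvScanMin (a :: t) a 0 1).2,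
      rfl, ?_, ?_, ?_⟩
    · rw [← hm, List.getD_eq_getElem _ _ hmi]
      exact List.getElem_mem _
    · intro z hz
      obtain ⟨j, hjlen, rfl⟩ := List.mem_iff_getElem.mp hz
      rw [← List.getD_eq_getElem _ 0 hjlen]
      exact hmin j hjlen
    · rw [← hm, List.getD_eq_getElem _ _ hmi]
      exact List.getElem_cons_eraseIdx_perm hmi

def PvRel (a b : Option (List Int)) : Prop :=
  (a = none ∧ b = none) ∨
    ∃ h l, a = some h ∧ b = some l ∧ h.Perm l ∧ PvIsHeap h

theorem pv_step_rel {h l : List Int} (hp : h.Perm l) (hh : PvIsHeap h) :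
    PvRel (pvStepA h) (pvStepB l) := by
  by_cases hln : l = []
  · subst hln
    have hh0 : h = [] := hp.eq_nil
    subst hh0
    exact Or.inl ⟨rfl, rfl⟩
  · have hhn : h ≠ [] := by
      intro hc; subst hc; exact hln hp.symm.eq_nil
    obtain ⟨x, h1, hpop, hh1, hxmem, hxmin, hxperm⟩ := pv_heappop_spec hh hhn
    obtain ⟨y, l1, hext, hymem, hymin, hyperm⟩ := pv_extractMin_spec hln
    have hxy : x = y :=
      le_antisymm (hxmin y (hp.mem_iff.mpr hymem)) (hymin x (hp.mem_iff.mp hxmem))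
    subst hxy
    have hp1 : h1.Perm l1 :=
      (hxperm.trans (hp.trans hyperm.symm)).cons_inv
    by_cases hl1 : l1 = []
    · subst hl1
      have hh10 : h1 = [] := hp1.eq_nil
      simp only [pvStepA, pvStepB, hpop, hext, hh10]
      exact Or.inl ⟨rfl, rfl⟩
    · have hh1n : h1 ≠ [] := by
        intro hc; subst hc; exact hl1 hp1.symm.eq_nil
      obtain ⟨x2, h2, hpop2, hh2, hx2mem, hx2min, hx2perm⟩ := pv_heappop_spec hh1 hh1n
      obtain ⟨y2, l2, hext2, hy2mem, hy2min, hy2perm⟩ := pv_extractMin_spec hl1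
      have hxy2 : x2 = y2 :=
        le_antisymm (hx2min y2 (hp1.mem_iff.mpr hy2mem)) (hy2min x2 (hp1.mem_iff.mp hx2mem))
      subst hxy2
      have hp2 : h2.Perm l2 :=
        (hx2perm.trans (hp1.trans hy2perm.symm)).cons_inv
      simp only [pvStepA, pvStepB, hpop, hext, hpop2, hext2]
      refine Or.inr ⟨_, _, rfl, rfl, ?_, ?_⟩
      · obtain ⟨q1, q2⟩ := pv_heappush_spec hh2 (x + x2)
        obtain ⟨r1, r2⟩ := pv_heappush_spec q1 (x + x2)
        refine r2.trans ?_
        refine ((q2.cons _).trans ?_)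
        refine ((hp2.cons _).cons _).trans ?_
        refine ((List.perm_append_singleton (x + x2) l2).symm.cons _).trans ?_
        exact (List.perm_append_singleton (x + x2) (l2 ++ [x + x2])).symm
      · exact (pv_heappush_spec (pv_heappush_spec hh2 (x + x2)).1 (x + x2)).1

theorem pv_loop_rel : ∀ n a b, PvRel a b → PvRel (pvLoopA n a) (pvLoopB n b) := by
  intro n
  induction n with
  | zero => intro a b hr; exact hr
  | succ n ih =>
    intro a b hr
    rcases hr with ⟨ha, hb⟩ | ⟨h, l, ha, hb, hp, hh⟩
    · subst ha; subst hb; exact ih _ _ (Or.inl ⟨rfl, rfl⟩)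
    · subst ha; subst hb; exact ih _ _ (pv_step_rel hp hh)

theorem pv_build_spec : ∀ (xs acc : List Int), PvIsHeap acc →
    PvIsHeap (xs.foldl (fun acc a => pvHeappush acc a) acc) ∧
      (xs.foldl (fun acc a => pvHeappush acc a) acc).Perm (acc ++ xs) := by
  intro xs
  induction xs with
  | nil =>
    intro acc hacc
    exact ⟨hacc, by simp⟩
  | cons x xs ih =>
    intro acc hacc
    obtain ⟨hph, hpp⟩ := pv_heappush_spec hacc x
    obtain ⟨ih1, ih2⟩ := ih (pvHeappush acc x) hph
    refine ⟨ih1, ih2.trans ?_⟩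
    refine (hpp.append_right xs).trans ?_
    simpa using (List.perm_middle (a := x) (l₁ := acc) (l₂ := xs)).symm

-- ===== VERDICT (by name: the statement is the Claim_ definition above) =====
theorem solution_spec : Claim_equal_solution := by
  intro ability number _hdom _hpre
  unfold Spec_solution solution solution_alt
  obtain ⟨hb1, hb2⟩ := pv_build_spec ability [] (by intro j hj hj2; simp at hj2)
  have hrel := pv_loop_rel number.toNat _ _
    (Or.inr ⟨_, ability, rfl, rfl, by simpa using hb2, hb1⟩)
  rcases hrel with ⟨ha, hb⟩ | ⟨h, l, ha, hb, hp, _⟩ <;> simp only [ha, hb]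
  exact hp.sum_eq
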